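-- pv_equiv track=rewrite | github.com/Pardeep-Lohia/Pythonlibraries | tempfile/examples/secure_file_processing.py | sanitize_text_content
-- ===== SOURCE A (Python) =====
-- def sanitize_text_content(content):
--     """Basic text sanitization."""
--     # Remove potentially dangerous patterns
--     dangerous_patterns = [
--         '#!/bin/bash',
--         '#!/usr/bin/env',
--         'rm -rf',
--         'sudo',
--         'chmod +x'
--     ]
--
--     sanitized = content
--     for pattern in dangerous_patterns:
--         sanitized = sanitized.replace(pattern, f'[REMOVED: {pattern}]')
--
--     return sanitized
-- ===== SOURCE B (Python) =====
-- def sanitize_text_content(content):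
--     """Basic text sanitization: single left-to-right scan instead of five replace passes."""
--     dangerous_patterns = [
--         '#!/bin/bash',
--         '#!/usr/bin/env',
--         'rm -rf',
--         'sudo',
--         'chmod +x'
--     ]
--     out = []
--     i = 0
--     n = len(content)
--     while i < n:
--         for pattern in dangerous_patterns:
--             if content.startswith(pattern, i):
--                 out.append('[REMOVED: ' + pattern + ']')
--                 i += len(pattern)
--                 break
--         else:
--             out.append(content[i])
--             i += 1
--     return ''.join(out)
-- ===== Notes on version B (the rewrite author's own statement) =====
-- stated objective: alternative
-- what changed: Replaced five sequential whole-string str.replace passes with one left-to-right scan that tries all five patterns at each position and emits the marker or the character; equivalence holds because the patterns and markers are mutually non-overlapping.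
import Mathlib
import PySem

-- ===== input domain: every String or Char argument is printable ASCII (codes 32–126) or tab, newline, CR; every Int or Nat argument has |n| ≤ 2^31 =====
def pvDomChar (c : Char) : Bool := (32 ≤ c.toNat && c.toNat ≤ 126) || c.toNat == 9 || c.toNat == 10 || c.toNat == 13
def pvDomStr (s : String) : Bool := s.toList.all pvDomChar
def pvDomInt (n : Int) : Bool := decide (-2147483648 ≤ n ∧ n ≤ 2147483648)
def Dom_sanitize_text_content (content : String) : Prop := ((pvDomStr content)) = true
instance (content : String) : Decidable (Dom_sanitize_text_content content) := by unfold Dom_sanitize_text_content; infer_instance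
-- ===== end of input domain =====

-- B replaces A's five sequential str.replace passes by ONE left-to-right scan trying all
-- five patterns at each position (objective: alternative; same return value for every string).

-- ===== PORT A =====
-- literal port of A: fold the pattern list; each step is sanitized.replace(pattern, f'[REMOVED: {pattern}]')
def sanitize_text_content (content : String) : String :=
  let dangerous_patterns : List String :=
    ["#!/bin/bash", "#!/usr/bin/env", "rm -rf", "sudo", "chmod +x"]
  dangerous_patterns.foldl
    (fun sanitized pattern =>
      PySem.Str.replace sanitized pattern ("[REMOVED: " ++ pattern ++ "]"))
    content

-- ===== PORT B =====
-- B-side helpers: the five dangerous patterns as char lists, and the removal marker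
def pvP1 : List Char := "#!/bin/bash".toList
def pvP2 : List Char := "#!/usr/bin/env".toList
def pvP3 : List Char := "rm -rf".toList
def pvP4 : List Char := "sudo".toList
def pvP5 : List Char := "chmod +x".toList

def pvPatterns : List (List Char) := [pvP1, pvP2, pvP3, pvP4, pvP5]

def pvMarker (p : List Char) : List Char := "[REMOVED: ".toList ++ p ++ "]".toList

-- Source B's inner for-loop: the first pattern with content.startswith(pattern, i), if any
def pvFirstMatch (s : List Char) : Option (List Char) :=
  pvPatterns.find? (fun p => p.isPrefixOf s)

lemma pvPatterns_pos : ∀ p ∈ pvPatterns, 0 < p.length := by decide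

lemma pvFirstMatch_pos {s p : List Char} (h : pvFirstMatch s = some p) : 0 < p.length :=
  pvPatterns_pos p (List.mem_of_find?_eq_some h)

-- Source B's while loop over the index i, as recursion on the remaining characters:
-- emit the marker and skip the pattern, or emit the current character
def pvScan : List Char → List Char
  | [] => []
  | c :: t =>
    match h : pvFirstMatch (c :: t) with
    | some p => pvMarker p ++ pvScan ((c :: t).drop p.length)
    | none => c :: pvScan t
termination_by s => s.length
decreasing_by
  · have := pvFirstMatch_pos h
    simp only [List.length_drop, List.length_cons]
    omega
  · simp

def sanitize_text_content_alt (content : String) : String :=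
  String.ofList (pvScan content.toList)

-- ===== PRECONDITION & SPEC =====
def Spec_sanitize_text_content (content : String) (out : String) : Prop := out = sanitize_text_content_alt content
instance (content : String) (out : String) : Decidable (Spec_sanitize_text_content content out) := by unfold Spec_sanitize_text_content; infer_instance

-- ===== CLAIM (what is proved, stated in full; the proofs are below) =====
def Claim_equal_sanitize_text_content : Prop := ∀ (content : String), Dom_sanitize_text_content content → Spec_sanitize_text_content content (sanitize_text_content content)

-- ===== LEMMAS AND PROOFS =====

-- clean recursive form of CPython's str.replace for a nonempty needle
def pvRep (p m : List Char) : List Char → List Char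
  | [] => []
  | c :: t =>
    if h : p.isPrefixOf (c :: t) = true ∧ p ≠ [] then
      m ++ pvRep p m ((c :: t).drop p.length)
    else
      c :: pvRep p m t
termination_by s => s.length
decreasing_by
  · have : 0 < p.length := List.length_pos_iff.mpr h.2
    simp only [List.length_drop, List.length_cons]
    omega
  · simp

lemma pvRep_nil (p m : List Char) : pvRep p m [] = [] := by
  rw [pvRep]

lemma pvRep_cons_pos {p : List Char} (m : List Char) {c : Char} {t : List Char}
    (h : p.isPrefixOf (c :: t) = true ∧ p ≠ []) :
    pvRep p m (c :: t) = m ++ pvRep p m ((c :: t).drop p.length) := by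
  rw [pvRep, dif_pos h]

lemma pvRep_cons_nomatch {p : List Char} (m : List Char) {c : Char} {t : List Char}
    (h : ¬ p <+: c :: t) :
    pvRep p m (c :: t) = c :: pvRep p m t := by
  rw [pvRep, dif_neg]
  rintro ⟨h1, -⟩
  exact h (List.isPrefixOf_iff_prefix.mp h1)

lemma pvRep_match {p m u : List Char} (hp : p ≠ []) (h : p <+: u) :
    pvRep p m u = m ++ pvRep p m (u.drop p.length) := by
  cases u with
  | nil => exact absurd (List.prefix_nil.mp h) hp
  | cons c t => exact pvRep_cons_pos m ⟨List.isPrefixOf_iff_prefix.mpr h, hp⟩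

lemma pvRep_self {p m : List Char} (x : List Char) (hp : p ≠ []) :
    pvRep p m (p ++ x) = m ++ pvRep p m x := by
  rw [pvRep_match hp (List.prefix_append p x), List.drop_left]

-- fuel-irrelevance: PySem's replace loop with enough fuel is pvRep
lemma pvGo_eq (p m : List Char) (hp : p ≠ []) :
    ∀ (fuel : Nat) (l acc : List Char), l.length ≤ fuel →
      PySem.Chars.replace.go p m fuel l acc = acc.reverse ++ pvRep p m l := by
  intro fuel
  induction fuel with
  | zero =>
    intro l acc hl
    have hl0 : l = [] := List.eq_nil_of_length_eq_zero (Nat.le_zero.mp hl)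
    subst hl0
    rw [PySem.Chars.replace.go, pvRep_nil]
  | succ n ih =>
    intro l acc hl
    cases l with
    | nil =>
      rw [PySem.Chars.replace.go, pvRep_nil]
      simp
      omega
    | cons c t =>
      rw [PySem.Chars.replace.go]
      by_cases h : p.isPrefixOf (c :: t) = true
      · have hlen : ((c :: t).drop p.length).length ≤ n := by
          have : 0 < p.length := List.length_pos_iff.mpr hp
          simp only [List.length_drop, List.length_cons]
          simp only [List.length_cons] at hl
          omega
        rw [if_pos h, ih _ _ hlen, pvRep_cons_pos m ⟨h, hp⟩]
        simp
      · have hlen : t.length ≤ n := by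
          simp only [List.length_cons] at hl; omega
        rw [if_neg h, ih _ _ hlen,
          pvRep_cons_nomatch m (fun hpre => h (List.isPrefixOf_iff_prefix.mpr hpre))]
        simp

lemma pvReplace_eq (s p m : List Char) (hp : p ≠ []) :
    PySem.Chars.replace s p m = pvRep p m s := by
  rw [PySem.Chars.replace, if_neg (by simpa using hp)]
  simpa using pvGo_eq p m hp s.length s [] le_rfl

-- p and q never overlap: q matches at no offset inside an occurrence of p
def pvCompat (p q : List Char) : Bool :=
  (List.range p.length).all
    (fun k => !((p.drop k).isPrefixOf q) && !(q.isPrefixOf (p.drop k)))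

lemma pvCompat_spec {p q : List Char} (h : pvCompat p q = true) :
    ∀ k, k < p.length → ¬ (p.drop k <+: q) ∧ ¬ (q <+: p.drop k) := by
  intro k hk
  have := List.all_eq_true.mp h k (List.mem_range.mpr hk)
  simp only [Bool.and_eq_true, Bool.not_eq_true', ← Bool.not_eq_true,
    List.isPrefixOf_iff_prefix] at this
  exact this

-- walking pvRep q over an occurrence of p leaves the occurrence intact when p, q never overlap
lemma pvRep_skip {q mq : List Char} :
    ∀ (p u : List Char), pvCompat p q = true → p <+: u →
      pvRep q mq u = p ++ pvRep q mq (u.drop p.length) := by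
  intro p
  induction p with
  | nil => intro u _ _; simp
  | cons a p' ih =>
    intro u hC hpre
    obtain ⟨r, rfl⟩ := hpre
    have h0 := pvCompat_spec hC 0 (by simp)
    simp only [List.drop_zero] at h0
    have hnq : ¬ q <+: a :: (p' ++ r) := by
      intro hq
      have hp' : (a :: p') <+: a :: (p' ++ r) := ⟨r, by simp⟩
      rcases List.prefix_or_prefix_of_prefix hq hp' with h | h
      · exact h0.2 h
      · exact h0.1 h
    have hC' : pvCompat p' q = true := by
      apply List.all_eq_true.mpr
      intro k hk
      have := List.all_eq_true.mp hC (k + 1)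
        (by simp only [List.mem_range] at hk ⊢; simpa using Nat.succ_lt_succ hk)
      simpa using this
    rw [show (a :: p') ++ r = a :: (p' ++ r) from rfl, pvRep_cons_nomatch mq hnq,
      ih (p' ++ r) hC' (List.prefix_append p' r)]
    simp

lemma pvSkip (p q mq x : List Char) (hC : pvCompat p q = true) :
    pvRep q mq (p ++ x) = p ++ pvRep q mq x := by
  rw [pvRep_skip p (p ++ x) hC (List.prefix_append p x), List.drop_left]

-- prefix reflection: a '['-free word prefixing the output of pvRep also prefixes its input
-- (every marker starts with '[')
lemma pvRep_reflect {p m : List Char} (hm : ∃ m', m = '[' :: m') :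
    ∀ (n : Nat) (q u : List Char), '[' ∉ q → u.length ≤ n → q <+: pvRep p m u → q <+: u := by
  intro n
  induction n with
  | zero =>
    intro q u _ hu h
    have hu0 : u = [] := List.eq_nil_of_length_eq_zero (Nat.le_zero.mp hu)
    subst hu0
    rwa [pvRep_nil] at h
  | succ n ih =>
    intro q u hq hu h
    cases u with
    | nil => rwa [pvRep_nil] at h
    | cons c t =>
      by_cases hcond : p.isPrefixOf (c :: t) = true ∧ p ≠ []
      · rw [pvRep_cons_pos m hcond] at h
        obtain ⟨m', rfl⟩ := hm
        cases q with
        | nil => exact List.nil_prefix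
        | cons d q' =>
          have hd : d = '[' := (List.cons_prefix_cons.mp h).1
          exact absurd (hd ▸ List.mem_cons_self) hq
      · rw [pvRep, dif_neg hcond] at h
        cases q with
        | nil => exact List.nil_prefix
        | cons d q' =>
          obtain ⟨hd, hq'⟩ := List.cons_prefix_cons.mp h
          have ht : t.length ≤ n := by
            simp only [List.length_cons] at hu; omega
          have hq'notin : '[' ∉ q' := fun h' => hq (List.mem_cons_of_mem _ h')
          exact List.cons_prefix_cons.mpr ⟨hd, ih q' t hq'notin ht hq'⟩

lemma pvMarker_cons (p : List Char) : ∃ m', pvMarker p = '[' :: m' :=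
  ⟨"REMOVED: ".toList ++ p ++ "]".toList, rfl⟩

-- reflection through one kept character
lemma pvRep_reflect_cons {p m q : List Char} (hm : ∃ m', m = '[' :: m') (hq : '[' ∉ q)
    {c : Char} {x : List Char} (h : q <+: c :: pvRep p m x) : q <+: c :: x := by
  cases q with
  | nil => exact List.nil_prefix
  | cons d q' =>
    obtain ⟨hd, hq'⟩ := List.cons_prefix_cons.mp h
    have hq'notin : '[' ∉ q' := fun h' => hq (List.mem_cons_of_mem _ h')
    exact List.cons_prefix_cons.mpr
      ⟨hd, pvRep_reflect hm x.length q' x hq'notin le_rfl hq'⟩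

-- the composition of A's five replace passes, innermost (= first) pass applied first
def pvChain (s : List Char) : List Char :=
  pvRep pvP5 (pvMarker pvP5)
    (pvRep pvP4 (pvMarker pvP4)
      (pvRep pvP3 (pvMarker pvP3)
        (pvRep pvP2 (pvMarker pvP2)
          (pvRep pvP1 (pvMarker pvP1) s))))

lemma pvChain_step1 (x : List Char) :
    pvChain (pvP1 ++ x) = pvMarker pvP1 ++ pvChain x := by
  unfold pvChain
  rw [pvRep_self x (by decide),
    pvSkip (pvMarker pvP1) pvP2 (pvMarker pvP2) _ (by decide),
    pvSkip (pvMarker pvP1) pvP3 (pvMarker pvP3) _ (by decide),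
    pvSkip (pvMarker pvP1) pvP4 (pvMarker pvP4) _ (by decide),
    pvSkip (pvMarker pvP1) pvP5 (pvMarker pvP5) _ (by decide)]

lemma pvChain_step2 (x : List Char) :
    pvChain (pvP2 ++ x) = pvMarker pvP2 ++ pvChain x := by
  unfold pvChain
  rw [pvSkip pvP2 pvP1 (pvMarker pvP1) x (by decide),
    pvRep_self _ (by decide),
    pvSkip (pvMarker pvP2) pvP3 (pvMarker pvP3) _ (by decide),
    pvSkip (pvMarker pvP2) pvP4 (pvMarker pvP4) _ (by decide),
    pvSkip (pvMarker pvP2) pvP5 (pvMarker pvP5) _ (by decide)]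

lemma pvChain_step3 (x : List Char) :
    pvChain (pvP3 ++ x) = pvMarker pvP3 ++ pvChain x := by
  unfold pvChain
  rw [pvSkip pvP3 pvP1 (pvMarker pvP1) x (by decide),
    pvSkip pvP3 pvP2 (pvMarker pvP2) _ (by decide),
    pvRep_self _ (by decide),
    pvSkip (pvMarker pvP3) pvP4 (pvMarker pvP4) _ (by decide),
    pvSkip (pvMarker pvP3) pvP5 (pvMarker pvP5) _ (by decide)]

lemma pvChain_step4 (x : List Char) :
    pvChain (pvP4 ++ x) = pvMarker pvP4 ++ pvChain x := by
  unfold pvChain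
  rw [pvSkip pvP4 pvP1 (pvMarker pvP1) x (by decide),
    pvSkip pvP4 pvP2 (pvMarker pvP2) _ (by decide),
    pvSkip pvP4 pvP3 (pvMarker pvP3) _ (by decide),
    pvRep_self _ (by decide),
    pvSkip (pvMarker pvP4) pvP5 (pvMarker pvP5) _ (by decide)]

lemma pvChain_step5 (x : List Char) :
    pvChain (pvP5 ++ x) = pvMarker pvP5 ++ pvChain x := by
  unfold pvChain
  rw [pvSkip pvP5 pvP1 (pvMarker pvP1) x (by decide),
    pvSkip pvP5 pvP2 (pvMarker pvP2) _ (by decide),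
    pvSkip pvP5 pvP3 (pvMarker pvP3) _ (by decide),
    pvSkip pvP5 pvP4 (pvMarker pvP4) _ (by decide),
    pvRep_self _ (by decide)]

lemma pvChain_cons {c : Char} {t : List Char}
    (h1 : ¬ pvP1 <+: c :: t) (h2 : ¬ pvP2 <+: c :: t) (h3 : ¬ pvP3 <+: c :: t)
    (h4 : ¬ pvP4 <+: c :: t) (h5 : ¬ pvP5 <+: c :: t) :
    pvChain (c :: t) = c :: pvChain t := by
  unfold pvChain
  rw [pvRep_cons_nomatch _ h1,
    pvRep_cons_nomatch _ (fun hq => h2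
      (pvRep_reflect_cons (pvMarker_cons _) (by decide) hq)),
    pvRep_cons_nomatch _ (fun hq => h3
      (pvRep_reflect_cons (pvMarker_cons _) (by decide)
        (pvRep_reflect_cons (pvMarker_cons _) (by decide) hq))),
    pvRep_cons_nomatch _ (fun hq => h4
      (pvRep_reflect_cons (pvMarker_cons _) (by decide)
        (pvRep_reflect_cons (pvMarker_cons _) (by decide)
          (pvRep_reflect_cons (pvMarker_cons _) (by decide) hq)))),
    pvRep_cons_nomatch _ (fun hq => h5
      (pvRep_reflect_cons (pvMarker_cons _) (by decide)
        (pvRep_reflect_cons (pvMarker_cons _) (by decide)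
          (pvRep_reflect_cons (pvMarker_cons _) (by decide)
            (pvRep_reflect_cons (pvMarker_cons _) (by decide) hq)))))]

lemma pvScan_match {s p : List Char} (h : pvFirstMatch s = some p) :
    pvScan s = pvMarker p ++ pvScan (s.drop p.length) := by
  cases s with
  | nil =>
    rw [show pvFirstMatch [] = (none : Option (List Char)) from by decide] at h
    exact absurd h (by simp)
  | cons c t =>
    rw [pvScan]
    split <;> simp_all

lemma pvScan_nomatch {c : Char} {t : List Char} (h : pvFirstMatch (c :: t) = none) :
    pvScan (c :: t) = c :: pvScan t := by
  rw [pvScan]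
  split <;> simp_all

-- main lemma: A's five passes equal B's one pass, on every char list
lemma pvChain_eq_scan : ∀ (n : Nat) (s : List Char), s.length ≤ n → pvChain s = pvScan s := by
  intro n
  induction n with
  | zero =>
    intro s hs
    have hs0 : s = [] := List.eq_nil_of_length_eq_zero (Nat.le_zero.mp hs)
    subst hs0
    simp [pvChain, pvRep_nil, pvScan]
  | succ n ih =>
    intro s hs
    cases s with
    | nil => simp [pvChain, pvRep_nil, pvScan]
    | cons c t =>
      by_cases hp1 : pvP1 <+: c :: t
      · obtain ⟨x, hx⟩ := hp1
        have hlen : x.length ≤ n := by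
          have := congrArg List.length hx
          simp only [List.length_append, List.length_cons] at this
          simp only [List.length_cons] at hs
          have hP : 0 < pvP1.length := by decide
          omega
        have hFM : pvFirstMatch (c :: t) = some pvP1 := by
          simp [pvFirstMatch, pvPatterns,
            List.isPrefixOf_iff_prefix.mpr ⟨x, hx⟩]
        rw [pvScan_match hFM, ← hx, pvChain_step1, List.drop_left, ih x hlen]
      · by_cases hp2 : pvP2 <+: c :: t
        · obtain ⟨x, hx⟩ := hp2
          have hlen : x.length ≤ n := by
            have := congrArg List.length hx
            simp only [List.length_append, List.length_cons] at this
            simp only [List.length_cons] at hs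
            have hP : 0 < pvP2.length := by decide
            omega
          have hFM : pvFirstMatch (c :: t) = some pvP2 := by
            simp [pvFirstMatch, pvPatterns, List.find?,
              (Bool.not_eq_true _).mp (fun hh => hp1 (List.isPrefixOf_iff_prefix.mp hh)),
              List.isPrefixOf_iff_prefix.mpr ⟨x, hx⟩]
          rw [pvScan_match hFM, ← hx, pvChain_step2, List.drop_left, ih x hlen]
        · by_cases hp3 : pvP3 <+: c :: t
          · obtain ⟨x, hx⟩ := hp3
            have hlen : x.length ≤ n := by
              have := congrArg List.length hx
              simp only [List.length_append, List.length_cons] at this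
              simp only [List.length_cons] at hs
              have hP : 0 < pvP3.length := by decide
              omega
            have hFM : pvFirstMatch (c :: t) = some pvP3 := by
              simp [pvFirstMatch, pvPatterns, List.find?,
                (Bool.not_eq_true _).mp (fun hh => hp1 (List.isPrefixOf_iff_prefix.mp hh)),
                (Bool.not_eq_true _).mp (fun hh => hp2 (List.isPrefixOf_iff_prefix.mp hh)),
                List.isPrefixOf_iff_prefix.mpr ⟨x, hx⟩]
            rw [pvScan_match hFM, ← hx, pvChain_step3, List.drop_left, ih x hlen]
          · by_cases hp4 : pvP4 <+: c :: t
            · obtain ⟨x, hx⟩ := hp4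
              have hlen : x.length ≤ n := by
                have := congrArg List.length hx
                simp only [List.length_append, List.length_cons] at this
                simp only [List.length_cons] at hs
                have hP : 0 < pvP4.length := by decide
                omega
              have hFM : pvFirstMatch (c :: t) = some pvP4 := by
                simp [pvFirstMatch, pvPatterns, List.find?,
                  (Bool.not_eq_true _).mp (fun hh => hp1 (List.isPrefixOf_iff_prefix.mp hh)),
                  (Bool.not_eq_true _).mp (fun hh => hp2 (List.isPrefixOf_iff_prefix.mp hh)),
                  (Bool.not_eq_true _).mp (fun hh => hp3 (List.isPrefixOf_iff_prefix.mp hh)),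
                  List.isPrefixOf_iff_prefix.mpr ⟨x, hx⟩]
              rw [pvScan_match hFM, ← hx, pvChain_step4, List.drop_left, ih x hlen]
            · by_cases hp5 : pvP5 <+: c :: t
              · obtain ⟨x, hx⟩ := hp5
                have hlen : x.length ≤ n := by
                  have := congrArg List.length hx
                  simp only [List.length_append, List.length_cons] at this
                  simp only [List.length_cons] at hs
                  have hP : 0 < pvP5.length := by decide
                  omega
                have hFM : pvFirstMatch (c :: t) = some pvP5 := by
                  simp [pvFirstMatch, pvPatterns, List.find?,
                    (Bool.not_eq_true _).mp (fun hh => hp1 (List.isPrefixOf_iff_prefix.mp hh)),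
                    (Bool.not_eq_true _).mp (fun hh => hp2 (List.isPrefixOf_iff_prefix.mp hh)),
                    (Bool.not_eq_true _).mp (fun hh => hp3 (List.isPrefixOf_iff_prefix.mp hh)),
                    (Bool.not_eq_true _).mp (fun hh => hp4 (List.isPrefixOf_iff_prefix.mp hh)),
                    List.isPrefixOf_iff_prefix.mpr ⟨x, hx⟩]
                rw [pvScan_match hFM, ← hx, pvChain_step5, List.drop_left, ih x hlen]
              · have hFM : pvFirstMatch (c :: t) = none := by
                  simp [pvFirstMatch, pvPatterns, List.find?,
                    (Bool.not_eq_true _).mp (fun hh => hp1 (List.isPrefixOf_iff_prefix.mp hh)),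
                    (Bool.not_eq_true _).mp (fun hh => hp2 (List.isPrefixOf_iff_prefix.mp hh)),
                    (Bool.not_eq_true _).mp (fun hh => hp3 (List.isPrefixOf_iff_prefix.mp hh)),
                    (Bool.not_eq_true _).mp (fun hh => hp4 (List.isPrefixOf_iff_prefix.mp hh)),
                    (Bool.not_eq_true _).mp (fun hh => hp5 (List.isPrefixOf_iff_prefix.mp hh))]
                rw [pvScan_nomatch hFM,
                  pvChain_cons hp1 hp2 hp3 hp4 hp5,
                  ih t (by simp only [List.length_cons] at hs; omega)]

-- ===== VERDICT (by name: the statement is the Claim_ definition above) =====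
theorem sanitize_text_content_spec : Claim_equal_sanitize_text_content := by
  intro content _
  unfold Spec_sanitize_text_content sanitize_text_content sanitize_text_content_alt
  refine String.toList_inj.mp ?_
  simp only [List.foldl_cons, List.foldl_nil, PySem.Str.toList_replace,
    String.toList_append, String.toList_ofList]
  rw [pvReplace_eq _ _ _ (by decide), pvReplace_eq _ _ _ (by decide),
    pvReplace_eq _ _ _ (by decide), pvReplace_eq _ _ _ (by decide),
    pvReplace_eq _ _ _ (by decide)]
  have := pvChain_eq_scan content.toList.length content.toList le_rfl
  unfold pvChain at this
  simpa [pvP1, pvP2, pvP3, pvP4, pvP5, pvMarker] using this
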